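-- pv_equiv track=rewrite | github.com/KimGaeun309/-TIL | Prepare_Coding_Test/Coding_Test/21_W/별_찍기-10.py | MakeStar
-- ===== SOURCE A (Python) =====
-- def MakeStar(L):
--     Temp = []
--
--     for i in range(3 * len(L)):
--         if i // len(L) == 1:
--             Temp.append(L[i % len(L)] + " " * len(L) + L[i % len(L)])
--         else:
--             Temp.append(L[i % len(L)] * 3)
--
--     return Temp
-- ===== SOURCE B (Python) =====
-- def MakeStar(L):
--     top = [s * 3 for s in L]
--     mid = [s + " " * len(L) + s for s in L]
--     return top + mid + top
-- ===== Notes on version B (the rewrite author's own statement) =====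
-- stated objective: simpler
-- what changed: B builds the pattern as three stacked blocks (top, middle, top) by direct passes over L and concatenates them, instead of one loop over range(3*len(L)) with an i//len(L) branch and i%len(L) indexing.
import Mathlib
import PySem

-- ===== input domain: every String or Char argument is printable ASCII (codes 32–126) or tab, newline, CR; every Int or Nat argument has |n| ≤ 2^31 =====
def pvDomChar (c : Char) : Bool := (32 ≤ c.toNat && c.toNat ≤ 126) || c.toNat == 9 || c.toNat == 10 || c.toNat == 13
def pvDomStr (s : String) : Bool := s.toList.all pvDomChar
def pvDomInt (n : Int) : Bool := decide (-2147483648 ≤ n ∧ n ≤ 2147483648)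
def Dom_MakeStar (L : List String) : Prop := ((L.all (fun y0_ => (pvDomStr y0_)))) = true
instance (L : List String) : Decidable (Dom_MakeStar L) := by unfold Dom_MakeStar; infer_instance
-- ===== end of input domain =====

-- B replaces A's single modular-indexed loop over range(3*len(L)) by three direct passes over L
-- (top block, middle block, top block again) concatenated; objective: simpler. Same rows, same order.


-- ===== PORT A =====
-- shared string builders for the two identical Python row expressions (exact: Python str + and *,
-- written on List Char as PYSEM.md directs, since Lean's String.append is kernel-opaque):
-- s * 3
def starRow (s : String) : String := String.ofList (s.toList ++ s.toList ++ s.toList)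
-- s + " " * n + s
def midRow (n : Nat) (s : String) : String := String.ofList (s.toList ++ List.replicate n ' ' ++ s.toList)

-- literal port of A: one loop over range(3*len(L)), branch on i//len(L)==1, index L[i%len(L)].
-- pyGetD's default "" is never used: i % len(L) is always a valid index when the loop body runs.
def MakeStar (L : List String) : List String :=
  (PySem.List.pyRange 0 (3 * L.length) 1).foldl
    (fun Temp i =>
      if PySem.Int.floordiv i (L.length : Int) = 1 then
        Temp ++ [midRow L.length (PySem.List.pyGetD L (PySem.Int.mod i (L.length : Int)) "")]
      else
        Temp ++ [starRow (PySem.List.pyGetD L (PySem.Int.mod i (L.length : Int)) "")]) []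

-- ===== PORT B =====
-- literal port of B: top = [s*3 for s in L]; mid = [s + " "*len(L) + s for s in L]; top ++ mid ++ top
def MakeStar_alt (L : List String) : List String :=
  L.map starRow ++ L.map (midRow L.length) ++ L.map starRow

-- ===== PRECONDITION & SPEC =====
def Spec_MakeStar (L : List String) (out : List String) : Prop := out = MakeStar_alt L
instance (L : List String) (out : List String) : Decidable (Spec_MakeStar L out) := by unfold Spec_MakeStar; infer_instance

-- ===== CLAIM (what is proved, stated in full; the proofs are below) =====
def Claim_equal_MakeStar : Prop := ∀ (L : List String), Dom_MakeStar L → Spec_MakeStar L (MakeStar L)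

-- ===== LEMMAS AND PROOFS =====

-- A's per-index row (the loop body's value at index i)
def fRow (L : List String) (i : Int) : String :=
  if PySem.Int.floordiv i (L.length : Int) = 1 then
    midRow L.length (PySem.List.pyGetD L (PySem.Int.mod i (L.length : Int)) "")
  else
    starRow (PySem.List.pyGetD L (PySem.Int.mod i (L.length : Int)) "")

-- A's loop appends one row per index, so the fold is a map over the range.
theorem makeStar_eq_map (L : List String) :
    MakeStar L = (PySem.List.pyRange 0 (3 * (L.length : Int)) 1).map (fRow L) := by
  unfold MakeStar
  have h : (fun (Temp : List String) (i : Int) =>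
      if PySem.Int.floordiv i (L.length : Int) = 1 then
        Temp ++ [midRow L.length (PySem.List.pyGetD L (PySem.Int.mod i (L.length : Int)) "")]
      else
        Temp ++ [starRow (PySem.List.pyGetD L (PySem.Int.mod i (L.length : Int)) "")])
      = (fun Temp i => Temp ++ [fRow L i]) := by
    funext T i
    unfold fRow
    split <;> rfl
  rw [h, PySem.List.foldl_append_singleton_eq_map]
  rfl

-- one block of L.length consecutive indices starting at a maps to a direct pass over L
theorem segment_eq_map (L : List String) (a : Nat) (g : String → String)
    (hf : ∀ (j : Nat) (h : j < L.length), fRow L ((a + j : Nat) : Int) = g (L[j]'h)) :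
    (PySem.List.pyRange ((a : Nat) : Int) ((a + L.length : Nat) : Int) 1).map (fRow L) = L.map g := by
  rw [PySem.List.pyRange_one]
  have hlen : (((a + L.length : Nat) : Int) - ((a : Nat) : Int)).toNat = L.length := by
    push_cast; omega
  rw [hlen]
  apply List.ext_getElem (by simp)
  intro j hj hj'
  have hjn : j < L.length := by simpa using hj
  simp only [List.getElem_map, List.getElem_range]
  have hcast : ((a : Nat) : Int) + (j : Int) = ((a + j : Nat) : Int) := by push_cast; ring
  rw [hcast, hf j hjn]

-- evaluating A's row formula at index a + j when a = k * L.length, j < L.length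
theorem fRow_eval (L : List String) (k j : Nat) (hjn : j < L.length) :
    fRow L ((k * L.length + j : Nat) : Int)
      = (if k = 1 then midRow L.length (L[j]'hjn) else starRow (L[j]'hjn)) := by
  unfold fRow
  have hpos : 0 < L.length := Nat.pos_of_ne_zero (by omega)
  rw [PySem.Int.floordiv_natCast, PySem.Int.mod_natCast]
  have hd : (k * L.length + j) / L.length = k := by
    rw [Nat.mul_comm, Nat.mul_add_div hpos, Nat.div_eq_of_lt hjn]; omega
  have hm : (k * L.length + j) % L.length = j := by
    rw [Nat.mul_comm, Nat.mul_add_mod]; exact Nat.mod_eq_of_lt hjn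
  rw [hd, hm, PySem.List.pyGetD_natCast, List.getD_eq_getElem _ _ hjn]
  by_cases hk : k = 1
  · simp [hk]
  · have : ((k : Int) : Int) ≠ 1 := by exact_mod_cast fun h => hk (by exact_mod_cast h)
    simp [hk, this]

theorem MakeStar_spec_aux (L : List String) : MakeStar L = MakeStar_alt L := by
  rw [makeStar_eq_map]
  have hsplit : PySem.List.pyRange 0 (3 * (L.length : Int)) 1
      = PySem.List.pyRange ((0 : Nat) : Int) ((0 + L.length : Nat) : Int) 1
        ++ PySem.List.pyRange ((L.length : Nat) : Int) ((L.length + L.length : Nat) : Int) 1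
        ++ PySem.List.pyRange ((L.length + L.length : Nat) : Int) ((L.length + L.length + L.length : Nat) : Int) 1 := by
    have e1 : ((0 : Nat) : Int) = (0 : Int) := by norm_num
    have e2 : ((0 + L.length : Nat) : Int) = ((L.length : Nat) : Int) := by push_cast; ring
    have e3 : ((L.length + L.length + L.length : Nat) : Int) = 3 * (L.length : Int) := by push_cast; ring
    have b1 : (0 : Int) ≤ ((L.length : Nat) : Int) := by positivity
    have b2 : ((L.length : Nat) : Int) ≤ 3 * (L.length : Int) := by omega
    have b3 : ((L.length : Nat) : Int) ≤ ((L.length + L.length : Nat) : Int) := by push_cast; omega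
    have b4 : ((L.length + L.length : Nat) : Int) ≤ 3 * (L.length : Int) := by push_cast; omega
    rw [e1, e2, e3]
    rw [PySem.List.pyRange_one_append 0 ((L.length : Nat) : Int) (3 * (L.length : Int)) b1 b2,
        PySem.List.pyRange_one_append ((L.length : Nat) : Int) ((L.length + L.length : Nat) : Int) (3 * (L.length : Int)) b3 b4, List.append_assoc]
  rw [hsplit, List.map_append, List.map_append]
  unfold MakeStar_alt
  congr 1
  · congr 1
    · -- top block: indices 0 .. n-1, quotient 0
      apply segment_eq_map L 0 starRow
      intro j hjn
      have h0 : ((0 + j : Nat) : Int) = ((0 * L.length + j : Nat) : Int) := by push_cast; ring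
      rw [h0, fRow_eval L 0 j hjn]
      simp
    · -- middle block: indices n .. 2n-1, quotient 1
      apply segment_eq_map L L.length (midRow L.length)
      intro j hjn
      have h1 : ((L.length + j : Nat) : Int) = ((1 * L.length + j : Nat) : Int) := by
        push_cast; ring
      rw [h1, fRow_eval L 1 j hjn]
      simp
  · -- bottom block: indices 2n .. 3n-1, quotient 2
    apply segment_eq_map L (L.length + L.length) starRow
    intro j hjn
    have h2 : ((L.length + L.length + j : Nat) : Int) = ((2 * L.length + j : Nat) : Int) := by
      push_cast; ring
    rw [h2, fRow_eval L 2 j hjn]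
    simp

-- ===== VERDICT (by name: the statement is the Claim_ definition above) =====
theorem MakeStar_spec : Claim_equal_MakeStar := by
  intro L _
  unfold Spec_MakeStar
  exact MakeStar_spec_aux L
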